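-- pv_equiv track=rewrite | github.com/kevin-bot001/global-article-scraper | base_scraper.py | is_valid_article_url
-- ===== SOURCE A (Python) =====
-- def is_valid_article_url(url: str) -> bool:
--     """检查是否为有效的文章URL（子类可重写）"""
--     if not url:
--         return False
--     # 排除常见的非文章URL
--     exclude_patterns = [
--         "/tag/", "/category/", "/author/", "/page/",
--         "/search/", "/login", "/register", "/cart",
--         ".jpg", ".png", ".gif", ".pdf", ".css", ".js",
--     ]
--     url_lower = url.lower()
--     return not any(pattern in url_lower for pattern in exclude_patterns)
-- ===== SOURCE B (Python) =====
-- def is_valid_article_url(url: str) -> bool: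
--     """检查是否为有效的文章URL（子类可重写）"""
--     if not url:
--         return False
--     exclude_patterns = (
--         "/tag/", "/category/", "/author/", "/page/",
--         "/search/", "/login", "/register", "/cart",
--         ".jpg", ".png", ".gif", ".pdf", ".css", ".js",
--     )
--     u = url.lower()
--     # single left-to-right pass: at each position check whether any pattern starts there
--     for i in range(len(u)):
--         if u.startswith(exclude_patterns, i):
--             return False
--     return True
-- ===== Notes on version B (the rewrite author's own statement) =====
-- stated objective: alternative
-- what changed: A runs a separate substring search over the URL for each exclude pattern; B makes one left-to-right pass over the lowered URL, checking at each position whether any pattern starts there (str.startswith with a tuple).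
import Mathlib
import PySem

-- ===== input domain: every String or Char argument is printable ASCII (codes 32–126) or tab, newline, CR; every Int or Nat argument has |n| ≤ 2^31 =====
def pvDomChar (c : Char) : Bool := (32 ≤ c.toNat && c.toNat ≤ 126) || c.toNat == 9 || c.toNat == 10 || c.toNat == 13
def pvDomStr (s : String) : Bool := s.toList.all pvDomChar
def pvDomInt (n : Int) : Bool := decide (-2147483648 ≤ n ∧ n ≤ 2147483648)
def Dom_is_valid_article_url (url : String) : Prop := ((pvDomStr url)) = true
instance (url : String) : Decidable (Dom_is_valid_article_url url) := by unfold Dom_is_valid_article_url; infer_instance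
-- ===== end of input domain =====

-- B replaces A's per-pattern substring-search loop by one left-to-right pass over the
-- lowered URL, checking at each position whether any exclude pattern starts there
-- (objective: alternative single-pass traversal; same results, no speed claim).

-- ===== PORT A =====
def pvExcludePatterns : List String :=
  ["/tag/", "/category/", "/author/", "/page/",
   "/search/", "/login", "/register", "/cart",
   ".jpg", ".png", ".gif", ".pdf", ".css", ".js"]

def is_valid_article_url (url : String) : Bool :=
  if url = "" then false
  else
    let url_lower := PySem.Str.lower url
    !(pvExcludePatterns.any (fun pattern => PySem.Str.isIn pattern url_lower))

-- ===== PORT B =====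
-- the for-i loop of Source B: walk the suffixes of the lowered URL's character list,
-- returning false as soon as some pattern is a prefix of the current suffix
def pvScan : List Char → Bool
  | [] => true
  | c :: rest =>
      if pvExcludePatterns.any (fun p => PySem.Chars.startswith (c :: rest) p.toList)
      then false
      else pvScan rest

def is_valid_article_url_alt (url : String) : Bool :=
  if url = "" then false
  else pvScan (PySem.Str.lower url).toList

-- ===== PRECONDITION & SPEC =====
def Spec_is_valid_article_url (url : String) (out : Bool) : Prop := out = is_valid_article_url_alt url
instance (url : String) (out : Bool) : Decidable (Spec_is_valid_article_url url out) := by unfold Spec_is_valid_article_url; infer_instance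

-- ===== CLAIM (what is proved, stated in full; the proofs are below) =====
def Claim_equal_is_valid_article_url : Prop := ∀ (url : String), Dom_is_valid_article_url url → Spec_is_valid_article_url url (is_valid_article_url url)

-- ===== LEMMAS AND PROOFS =====

-- the single-pass scan returns true iff no exclude pattern occurs as an infix
theorem pvScan_eq (s : List Char) :
    pvScan s = !(pvExcludePatterns.any (fun p => PySem.Chars.isIn p.toList s)) := by
  induction s with
  | nil => decide
  | cons c rest ih =>
    rw [pvScan, ih]
    by_cases h : pvExcludePatterns.any (fun p => PySem.Chars.startswith (c :: rest) p.toList) = true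
    · rw [if_pos h]
      rcases List.any_eq_true.mp h with ⟨p, hp, hsw⟩
      have hall : pvExcludePatterns.any (fun q => PySem.Chars.isIn q.toList (c :: rest)) = true :=
        List.any_eq_true.mpr ⟨p, hp, (PySem.Chars.isIn_iff_infix _ _).mpr
          ((PySem.Chars.startswith_iff _ _).mp hsw).isInfix⟩
      rw [hall]; rfl
    · rw [if_neg h]
      congr 1
      apply Bool.eq_iff_iff.mpr
      constructor
      · intro hr
        rcases List.any_eq_true.mp hr with ⟨p, hp, hin⟩
        exact List.any_eq_true.mpr ⟨p, hp, (PySem.Chars.isIn_iff_infix _ _).mpr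
          (List.infix_cons ((PySem.Chars.isIn_iff_infix _ _).mp hin))⟩
      · intro hc
        rcases List.any_eq_true.mp hc with ⟨p, hp, hin⟩
        rcases List.infix_cons_iff.mp ((PySem.Chars.isIn_iff_infix _ _).mp hin) with hpre | hinf
        · exact absurd (List.any_eq_true.mpr ⟨p, hp, (PySem.Chars.startswith_iff _ _).mpr hpre⟩) h
        · exact List.any_eq_true.mpr ⟨p, hp, (PySem.Chars.isIn_iff_infix _ _).mpr hinf⟩

-- ===== VERDICT (by name: the statement is the Claim_ definition above) =====
theorem is_valid_article_url_spec : Claim_equal_is_valid_article_url := by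
  intro url _
  unfold Spec_is_valid_article_url is_valid_article_url is_valid_article_url_alt
  by_cases h : url = ""
  · simp [h]
  · rw [if_neg h, if_neg h, pvScan_eq]
    congr 1
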